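-- pv_equiv track=rewrite | github.com/d89012255/asr_button | predict_speech_file8.py | post_prrocess_3_normal
-- ===== SOURCE A (Python) =====
-- def post_prrocess_3_normal(input):
--     last_dot = ["an","ia"]
--     next_dot = ["ia","ia"]
--     last_page = ["an","e"]
--     last_team = ["an","u"]
--     last_record = ["an","i"]
--
--     next_page = ["ia","e"]
--     next_team = ["ia","u"]
--     next_record = ["ia","i"]
--
--     mix = [
--     last_dot,next_dot,last_page,last_team,last_record,next_page,next_team,next_record]
--     table= ["上一點","下一點","上一頁","上一組",
--     "上一筆","下一頁","下一組","下一筆"]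
--     table2=["S1D","X1D","S1Y","S1Z",
--     "S1B","X1Y","X1Z","X1B"]
--     all = ""
--     for i in range(len(input)):
--         all+=(input[i][:-1]+" ")
--     temp_for_check = all
--     for i in range(len(mix)):
--         temp_for_check = all
--         for b in range(len(mix[i])):
--
--             if(mix[i][b] in temp_for_check):
--                 temp_for_check = temp_for_check[temp_for_check.find(mix[i][b])+len(mix[i][b]):]
--
--                 if(b==len(mix[i])-1):
--                     return str(table[i])+'$'+str(table2[i])
--             else:
--                 break
--             continue
--     return "無法辨識$無法辨識"
-- ===== SOURCE B (Python) =====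
-- def post_prrocess_3_normal(input):
--     s = ''.join(tok[:-1] + ' ' for tok in input)
--     # One left-to-right pass over the characters: a small state machine records
--     # the first start index of 'an' and of 'ia' and the last start index of
--     # 'ia', 'e', 'u', 'i'; each command pattern then reduces to an index
--     # comparison "last(second) >= first(first)+2", i.e. the second syllable
--     # occurs after the first complete occurrence of the first syllable.
--     fan = fia = lia = le = lu = li = -1
--     prev = None
--     for k, c in enumerate(s):
--         if prev == 'a' and c == 'n' and fan < 0:
--             fan = k - 1
--         if prev == 'i' and c == 'a':
--             if fia < 0:
--                 fia = k - 1
--             lia = k - 1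
--         if c == 'e':
--             le = k
--         elif c == 'u':
--             lu = k
--         elif c == 'i':
--             li = k
--         prev = c
--     rules = [
--         (fan, lia, '上一點$S1D'), (fia, lia, '下一點$X1D'),
--         (fan, le, '上一頁$S1Y'), (fan, lu, '上一組$S1Z'), (fan, li, '上一筆$S1B'),
--         (fia, le, '下一頁$X1Y'), (fia, lu, '下一組$X1Z'), (fia, li, '下一筆$X1B'),
--     ]
--     for f, l, ans in rules:
--         if 0 <= f and f + 2 <= l:
--             return ans
--     return '無法辨識$無法辨識'
-- ===== Notes on version B (the rewrite author's own statement) =====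
-- stated objective: alternative
-- what changed: A re-scans the joined text for every one of the 8 patterns with find/slice/membership passes; B makes ONE left-to-right character pass with a small state machine that records the first start index of 'an'/'ia' and the last start index of 'ia'/'e'/'u'/'i', after which each pattern is decided by a single index comparison last(second) >= first(first)+2.
import Mathlib
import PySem

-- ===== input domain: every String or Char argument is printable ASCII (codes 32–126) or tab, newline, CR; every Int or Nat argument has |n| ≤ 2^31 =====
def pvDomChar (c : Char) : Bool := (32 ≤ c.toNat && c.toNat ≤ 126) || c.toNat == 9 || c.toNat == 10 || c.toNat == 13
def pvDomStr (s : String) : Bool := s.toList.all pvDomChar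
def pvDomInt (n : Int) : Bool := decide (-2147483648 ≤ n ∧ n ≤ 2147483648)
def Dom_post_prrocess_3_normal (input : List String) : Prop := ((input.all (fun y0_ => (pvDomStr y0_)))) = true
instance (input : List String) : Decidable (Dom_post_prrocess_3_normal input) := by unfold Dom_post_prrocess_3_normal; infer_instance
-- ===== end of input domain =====

-- B replaces A's eight per-pattern find/slice re-scans of the text by ONE left-to-right
-- character pass (a state machine recording first/last syllable start indices), after
-- which each pattern is a single index comparison (alternative algorithm).

-- ===== PORT A =====

-- inner loop of A: 'for b in range(len(pat)): if pat[b] in temp: temp = temp[find+len:]; if b==len(pat)-1: return …; else break'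
def pvInnerA (pat : List (List Char)) (temp : List Char) : Bool :=
  match pat with
  | [] => false
  | p :: rest =>
    if PySem.Chars.isIn p temp then
      let temp' := PySem.List.slice temp (some (PySem.Chars.find temp p + (p.length : Int))) none
      match rest with
      | [] => true
      | _ => pvInnerA rest temp'
    else false

-- outer loop of A over mix/table/table2 (zipped in order)
def pvOuterA (rules : List (List (List Char) × String × String)) (all : List Char) : String :=
  match rules with
  | [] => "無法辨識$無法辨識"
  | (pat, t1, t2) :: rest =>
    if pvInnerA pat all then t1 ++ "$" ++ t2 else pvOuterA rest all

def post_prrocess_3_normal (input : List String) : String :=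
  let mix : List (List (List Char)) :=
    [[['a','n'],['i','a']], [['i','a'],['i','a']], [['a','n'],['e']], [['a','n'],['u']],
     [['a','n'],['i']], [['i','a'],['e']], [['i','a'],['u']], [['i','a'],['i']]]
  let table : List String := ["上一點","下一點","上一頁","上一組","上一筆","下一頁","下一組","下一筆"]
  let table2 : List String := ["S1D","X1D","S1Y","S1Z","S1B","X1Y","X1Z","X1B"]
  let all : List Char :=
    (PySem.List.pyRange 0 (input.length : Int) 1).foldl
      (fun acc i => acc ++ PySem.List.slice (PySem.List.pyGetD input i "").toList none (some (-1)) ++ [' ']) []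
  pvOuterA (mix.zip (table.zip table2)) all

-- ===== PORT B =====

-- scan state of Source B's single pass: first start of 'an' / 'ia', last start of 'ia'/'e'/'u'/'i', previous char
structure PvSt where
  fan : Int
  fia : Int
  lia : Int
  le : Int
  lu : Int
  li : Int
  prev : Option Char
deriving Repr, DecidableEq

-- body of Source B's 'for k, c in enumerate(s)' loop
def pvStep (st : PvSt) (kc : Int × Char) : PvSt :=
  let fan := if st.prev = some 'a' ∧ kc.2 = 'n' ∧ st.fan < 0 then kc.1 - 1 else st.fan
  let fia := if st.prev = some 'i' ∧ kc.2 = 'a' ∧ st.fia < 0 then kc.1 - 1 else st.fia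
  let lia := if st.prev = some 'i' ∧ kc.2 = 'a' then kc.1 - 1 else st.lia
  let le := if kc.2 = 'e' then kc.1 else st.le
  let lu := if ¬ kc.2 = 'e' ∧ kc.2 = 'u' then kc.1 else st.lu
  let li := if ¬ kc.2 = 'e' ∧ ¬ kc.2 = 'u' ∧ kc.2 = 'i' then kc.1 else st.li
  ⟨fan, fia, lia, le, lu, li, some kc.2⟩

def pvScan (s : List Char) : PvSt :=
  (PySem.List.enumerate s 0).foldl pvStep ⟨-1, -1, -1, -1, -1, -1, none⟩

-- Source B's final 'for f, l, ans in rules' loop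
def pvPick : List (Int × Int × String) → String
  | [] => "無法辨識$無法辨識"
  | (f, l, ans) :: rs => if 0 ≤ f ∧ f + 2 ≤ l then ans else pvPick rs

def post_prrocess_3_normal_alt (input : List String) : String :=
  let s : List Char := (input.map (fun tok => PySem.List.slice tok.toList none (some (-1)) ++ [' '])).flatten
  let st := pvScan s
  pvPick
    [(st.fan, st.lia, "上一點$S1D"), (st.fia, st.lia, "下一點$X1D"),
     (st.fan, st.le, "上一頁$S1Y"), (st.fan, st.lu, "上一組$S1Z"), (st.fan, st.li, "上一筆$S1B"),
     (st.fia, st.le, "下一頁$X1Y"), (st.fia, st.lu, "下一組$X1Z"), (st.fia, st.li, "下一筆$X1B")]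

-- ===== PRECONDITION & SPEC =====
def Spec_post_prrocess_3_normal (input : List String) (out : String) : Prop := out = post_prrocess_3_normal_alt input
instance (input : List String) (out : String) : Decidable (Spec_post_prrocess_3_normal input out) := by unfold Spec_post_prrocess_3_normal; infer_instance

-- ===== CLAIM (what is proved, stated in full; the proofs are below) =====
def Claim_equal_post_prrocess_3_normal : Prop := ∀ (input : List String), Dom_post_prrocess_3_normal input → Spec_post_prrocess_3_normal input (post_prrocess_3_normal input)

-- ===== LEMMAS AND PROOFS =====

-- v is the index of the FIRST occurrence of p in s (-1 when absent)
def PvFirstSpec (p s : List Char) (v : Int) : Prop :=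
  (v = -1 ∧ ∀ j : Nat, ¬ p <+: s.drop j) ∨
  (0 ≤ v ∧ p <+: s.drop v.toNat ∧ ∀ j : Nat, j < v.toNat → ¬ p <+: s.drop j)

-- v is the index of the LAST occurrence of p in s (-1 when absent)
def PvLastSpec (p s : List Char) (v : Int) : Prop :=
  (v = -1 ∧ ∀ j : Nat, ¬ p <+: s.drop j) ∨
  (0 ≤ v ∧ p <+: s.drop v.toNat ∧ ∀ j : Nat, p <+: s.drop j → j ≤ v.toNat)

-- the two builds of the scan string are the same list of characters
lemma pv_all_eq (input : List String) :
    (PySem.List.pyRange 0 (input.length : Int) 1).foldl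
      (fun acc i => acc ++ PySem.List.slice (PySem.List.pyGetD input i "").toList none (some (-1)) ++ [' ']) []
    = (input.map (fun tok => PySem.List.slice tok.toList none (some (-1)) ++ [' '])).flatten := by
  have h := PySem.List.foldl_pyRange_pyGetD (xs := input) (a := 0)
    (f := fun (acc : List Char) (t : String) => acc ++ PySem.List.slice t.toList none (some (-1)) ++ [' '])
    (d := "") (init := ([] : List Char)) (by norm_num)
  simp only [List.append_assoc] at h
  have h2 := PySem.List.foldl_append_eq_flatMap
    (fun (tok : String) => PySem.List.slice tok.toList none (some (-1)) ++ ([' '] : List Char)) input ([] : List Char)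
  simp only [Int.toNat_zero, List.drop_zero] at h
  rw [h2] at h
  simpa [PySem.List.len, List.flatMap_def, List.append_assoc] using h

-- dropping to the last element
lemma pv_drop_last (s : List Char) (j : Nat) (h : j + 1 = s.length) :
    ∃ z, s.drop j = [z] ∧ s.getLast? = some z := by
  have hlen : (s.drop j).length = 1 := by simp [List.length_drop]; omega
  obtain ⟨z, hz⟩ := List.length_eq_one_iff.mp hlen
  refine ⟨z, hz, ?_⟩
  have h2 := List.getLast?_drop (l := s) (i := j)
  rw [if_neg (by omega), hz] at h2
  simpa using h2.symm

-- occurrences of a 2-char pattern in s ++ [c]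
lemma pv_pair_prefix_append (x y c : Char) (s : List Char) (j : Nat) :
    [x, y] <+: (s ++ [c]).drop j ↔
      [x, y] <+: s.drop j ∨ (j + 1 = s.length ∧ s.getLast? = some x ∧ c = y) := by
  rcases lt_trichotomy (j + 1) s.length with hj | hj | hj
  · rw [List.drop_append_of_le_length (by omega)]
    constructor
    · intro h
      left
      rw [List.prefix_iff_eq_take] at h ⊢
      rw [List.take_append_of_le_length (by simp [List.length_drop]; omega)] at h
      simpa using h
    · rintro (h | h)
      · exact h.trans (List.prefix_append _ _)
      · omega
  · obtain ⟨z, hz, hlast⟩ := pv_drop_last s j hj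
    rw [List.drop_append_of_le_length (by omega), hz]
    constructor
    · intro h
      have := List.prefix_iff_eq_take.mp h
      simp at this
      right
      refine ⟨hj, ?_, this.2.symm⟩
      rw [hlast, this.1]
    · rintro (h | ⟨_, hx, hc⟩)
      · have := h.length_le; simp at this
      · rw [hlast] at hx
        simp at hx
        subst hx; subst hc
        exact List.prefix_refl _
  · constructor
    · intro h
      exfalso
      rcases Nat.lt_or_ge j (s.length + 1) with hj2 | hj2
      · have hj3 : j = s.length := by omega
        rw [List.drop_append_of_le_length (by omega), hj3, List.drop_length] at h
        have := h.length_le; simp at this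
      · have h0 : (s ++ [c]).drop j = [] := by
          apply List.drop_eq_nil_of_le; simp; omega
        rw [h0] at h
        have := h.length_le; simp at this
    · rintro (h | h)
      · have h0 : s.drop j = [] := List.drop_eq_nil_of_le (by omega)
        rw [h0] at h
        have := h.length_le; simp at this
      · omega

-- occurrences of a 1-char pattern in s ++ [c]
lemma pv_single_prefix_append (x c : Char) (s : List Char) (j : Nat) :
    [x] <+: (s ++ [c]).drop j ↔ [x] <+: s.drop j ∨ (j = s.length ∧ c = x) := by
  rcases lt_trichotomy j s.length with hj | hj | hj
  · rw [List.drop_append_of_le_length (by omega)]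
    constructor
    · intro h
      left
      rw [List.prefix_iff_eq_take] at h ⊢
      rw [List.take_append_of_le_length (by simp [List.length_drop]; omega)] at h
      simpa using h
    · rintro (h | h)
      · exact h.trans (List.prefix_append _ _)
      · omega
  · subst hj
    rw [List.drop_append_of_le_length le_rfl, List.drop_length]
    constructor
    · intro h
      have := List.prefix_iff_eq_take.mp h
      simp at this
      right; exact ⟨rfl, this.symm⟩
    · rintro (h | ⟨_, rfl⟩)
      · have := h.length_le; simp at this
      · simp
  · constructor
    · intro h
      exfalso
      have h0 : (s ++ [c]).drop j = [] := by
        apply List.drop_eq_nil_of_le; simp; omega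
      rw [h0] at h
      have := h.length_le; simp at this
    · rintro (h | h)
      · have h0 : s.drop j = [] := List.drop_eq_nil_of_le (by omega)
        rw [h0] at h
        have := h.length_le; simp at this
      · omega

-- an occurrence needs room
lemma pv_occ_le (p s : List Char) (j : Nat) (hp : p ≠ []) (h : p <+: s.drop j) :
    j + p.length ≤ s.length := by
  have h1 := h.length_le
  have h2 : 0 < p.length := List.length_pos_of_ne_nil hp
  simp [List.length_drop] at h1
  omega

lemma pvFirst_step (x y c : Char) (s : List Char) (v : Int) (h : PvFirstSpec [x, y] s v) :
    PvFirstSpec [x, y] (s ++ [c])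
      (if s.getLast? = some x ∧ c = y ∧ v < 0 then (s.length : Int) - 1 else v) := by
  split_ifs with hc
  · obtain ⟨hx, hy, hv⟩ := hc
    rcases h with ⟨_, hno⟩ | ⟨h0, _, _⟩
    · have hs : s ≠ [] := by rintro rfl; simp at hx
      have hlen : 1 ≤ s.length := List.length_pos_of_ne_nil hs
      right
      refine ⟨by omega, ?_, ?_⟩
      · have ht : ((s.length : Int) - 1).toNat = s.length - 1 := by omega
        rw [ht, pv_pair_prefix_append]
        right; exact ⟨by omega, hx, hy⟩
      · intro j hj
        have ht : ((s.length : Int) - 1).toNat = s.length - 1 := by omega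
        rw [ht] at hj
        rw [pv_pair_prefix_append]
        rintro (h1 | ⟨h1, _⟩)
        · exact hno j h1
        · omega
    · omega
  · push Not at hc
    rcases h with ⟨hv, hno⟩ | ⟨h0, hocc, hmin⟩
    · left
      refine ⟨hv, fun j => ?_⟩
      rw [pv_pair_prefix_append]
      rintro (h1 | ⟨h1, h2, h3⟩)
      · exact hno j h1
      · exact absurd hv (by have := hc h2 h3; omega)
    · right
      refine ⟨h0, ?_, ?_⟩
      · rw [pv_pair_prefix_append]; left; exact hocc
      · intro j hj
        rw [pv_pair_prefix_append]
        rintro (h1 | ⟨h1, _, _⟩)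
        · exact hmin j hj h1
        · have := pv_occ_le _ s v.toNat (by simp) hocc
          simp at this
          omega

lemma pvLast_pair_step (x y c : Char) (s : List Char) (v : Int) (h : PvLastSpec [x, y] s v) :
    PvLastSpec [x, y] (s ++ [c])
      (if s.getLast? = some x ∧ c = y then (s.length : Int) - 1 else v) := by
  split_ifs with hc
  · obtain ⟨hx, hy⟩ := hc
    have hs : s ≠ [] := by rintro rfl; simp at hx
    have hlen : 1 ≤ s.length := List.length_pos_of_ne_nil hs
    have ht : ((s.length : Int) - 1).toNat = s.length - 1 := by omega
    right
    refine ⟨by omega, ?_, ?_⟩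
    · rw [ht, pv_pair_prefix_append]
      right; exact ⟨by omega, hx, hy⟩
    · intro j hj
      rw [pv_pair_prefix_append] at hj
      rw [ht]
      rcases hj with h1 | ⟨h1, _⟩
      · have := pv_occ_le _ s j (by simp) h1
        simp at this; omega
      · omega
  · push Not at hc
    rcases h with ⟨hv, hno⟩ | ⟨h0, hocc, hmax⟩
    · left
      refine ⟨hv, fun j => ?_⟩
      rw [pv_pair_prefix_append]
      rintro (h1 | ⟨h1, h2, h3⟩)
      · exact hno j h1
      · exact hc h2 h3
    · right
      refine ⟨h0, ?_, ?_⟩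
      · rw [pv_pair_prefix_append]; left; exact hocc
      · intro j hj
        rw [pv_pair_prefix_append] at hj
        rcases hj with h1 | ⟨h1, h2, h3⟩
        · exact hmax j h1
        · exact absurd h3 (hc h2)

lemma pvLast_single_step (x c : Char) (s : List Char) (v : Int) (h : PvLastSpec [x] s v) :
    PvLastSpec [x] (s ++ [c]) (if c = x then (s.length : Int) else v) := by
  split_ifs with hc
  · right
    refine ⟨by omega, ?_, ?_⟩
    · rw [Int.toNat_natCast, pv_single_prefix_append]
      right; exact ⟨rfl, hc⟩
    · intro j hj
      rw [pv_single_prefix_append] at hj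
      rw [Int.toNat_natCast]
      rcases hj with h1 | ⟨h1, _⟩
      · have := pv_occ_le _ s j (by simp) h1
        simp at this; omega
      · omega
  · rcases h with ⟨hv, hno⟩ | ⟨h0, hocc, hmax⟩
    · left
      refine ⟨hv, fun j => ?_⟩
      rw [pv_single_prefix_append]
      rintro (h1 | ⟨h1, h2⟩)
      · exact hno j h1
      · exact hc h2
    · right
      refine ⟨h0, ?_, ?_⟩
      · rw [pv_single_prefix_append]; left; exact hocc
      · intro j hj
        rw [pv_single_prefix_append] at hj
        rcases hj with h1 | ⟨_, h2⟩
        · exact hmax j h1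
        · exact absurd h2 hc

lemma pvScan_append (s : List Char) (c : Char) :
    pvScan (s ++ [c]) = pvStep (pvScan s) ((s.length : Int), c) := by
  unfold pvScan
  rw [PySem.List.enumerate_append, List.foldl_append]
  simp [PySem.List.enumerate]

-- the single pass computes exactly those six indices
lemma pvScan_spec (s : List Char) :
    (pvScan s).prev = s.getLast? ∧
    PvFirstSpec ['a','n'] s (pvScan s).fan ∧
    PvFirstSpec ['i','a'] s (pvScan s).fia ∧
    PvLastSpec ['i','a'] s (pvScan s).lia ∧
    PvLastSpec ['e'] s (pvScan s).le ∧
    PvLastSpec ['u'] s (pvScan s).lu ∧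
    PvLastSpec ['i'] s (pvScan s).li := by
  induction s using List.reverseRecOn with
  | nil =>
    refine ⟨rfl, ?_, ?_, ?_, ?_, ?_, ?_⟩ <;>
      exact Or.inl ⟨rfl, fun j h => by have := h.length_le; simp at this⟩
  | append_singleton s c ih =>
    obtain ⟨hprev, hfan, hfia, hlia, hle, hlu, hli⟩ := ih
    rw [pvScan_append]
    refine ⟨?_, ?_, ?_, ?_, ?_, ?_, ?_⟩
    · simp [pvStep]
    · simpa [pvStep, hprev, and_assoc] using pvFirst_step 'a' 'n' c s (pvScan s).fan hfan
    · simpa [pvStep, hprev, and_assoc] using pvFirst_step 'i' 'a' c s (pvScan s).fia hfia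
    · simpa [pvStep, hprev] using pvLast_pair_step 'i' 'a' c s (pvScan s).lia hlia
    · simpa [pvStep] using pvLast_single_step 'e' c s (pvScan s).le hle
    · have h := pvLast_single_step 'u' c s (pvScan s).lu hlu
      by_cases hc : c = 'u'
      · simpa [pvStep, hc] using h
      · simpa [pvStep, hc] using h
    · have h := pvLast_single_step 'i' c s (pvScan s).li hli
      by_cases hc : c = 'i'
      · have : ¬ c = 'e' ∧ ¬ c = 'u' := by subst hc; exact ⟨by decide, by decide⟩
        simpa [pvStep, hc, this] using h
      · simpa [pvStep, hc] using h

lemma pv_infix_iff (p s : List Char) : p <:+: s ↔ ∃ j : Nat, p <+: s.drop j := by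
  rw [← PySem.Chars.isIn_iff_infix, ← PySem.Chars.exists_prefix_drop_iff_isIn]

lemma pvFirst_eq_find (p s : List Char) (v : Int) (h : PvFirstSpec p s v) :
    v = PySem.Chars.find s p := by
  rcases h with ⟨hv, hno⟩ | ⟨h0, hocc, hmin⟩
  · rw [hv, Eq.comm, PySem.Chars.find_eq_neg_one_iff, pv_infix_iff]
    rintro ⟨j, hj⟩; exact hno j hj
  · have hfind : 0 ≤ PySem.Chars.find s p := by
      rw [PySem.Chars.find_nonneg_iff, pv_infix_iff]
      exact ⟨v.toNat, hocc⟩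
    obtain ⟨hocc', hmin'⟩ := PySem.Chars.find_spec (s := s) (sub := p) hfind
    rcases lt_trichotomy v.toNat (PySem.Chars.find s p).toNat with h1 | h1 | h1
    · exact absurd hocc (hmin' _ h1)
    · omega
    · exact absurd hocc' (hmin _ h1)

lemma pvLast_isIn (q s : List Char) (v : Int) (m : Nat) (h : PvLastSpec q s v) :
    PySem.Chars.isIn q (s.drop m) = true ↔ (m : Int) ≤ v := by
  rw [← PySem.Chars.exists_prefix_drop_iff_isIn]
  constructor
  · rintro ⟨j, hj⟩
    rw [List.drop_drop] at hj
    rcases h with ⟨hv, hno⟩ | ⟨h0, hocc, hmax⟩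
    · exact absurd hj (hno _)
    · have := hmax _ hj
      omega
  · intro hm
    rcases h with ⟨hv, hno⟩ | ⟨h0, hocc, hmax⟩
    · omega
    · refine ⟨v.toNat - m, ?_⟩
      rw [List.drop_drop]
      have : m + (v.toNat - m) = v.toNat := by omega
      rw [this]
      exact hocc

-- per pattern: A's find/slice/membership scan equals B's index comparison
lemma pv_inner_eq (x y : Char) (q s : List Char) (f l : Int)
    (hf : PvFirstSpec [x, y] s f) (hl : PvLastSpec q s l) :
    pvInnerA [[x, y], q] s = decide (0 ≤ f ∧ f + 2 ≤ l) := by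
  have hfind := pvFirst_eq_find _ _ _ hf
  by_cases hin : PySem.Chars.isIn [x, y] s
  · have h0 : 0 ≤ PySem.Chars.find s [x, y] := by
      rw [PySem.Chars.find_nonneg_iff, ← PySem.Chars.isIn_iff_infix]; exact hin
    have hslice := PySem.List.slice_from (xs := s) (a := PySem.Chars.find s [x, y] + 2) (by omega)
    have htn : (PySem.Chars.find s [x, y] + 2).toNat = (PySem.Chars.find s [x, y]).toNat + 2 := by omega
    rw [htn] at hslice
    simp only [pvInnerA, hin, if_true, List.length_cons, List.length_nil,
      Nat.reduceAdd, Nat.cast_ofNat]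
    rw [hslice]
    cases hqin : PySem.Chars.isIn q (s.drop ((PySem.Chars.find s [x, y]).toNat + 2)) with
    | true =>
      have hle := (pvLast_isIn q s l _ hl).mp hqin
      simp only [if_true]
      rw [Eq.comm, decide_eq_true_eq]
      push_cast at hle
      omega
    | false =>
      simp only [Bool.false_eq_true, if_false]
      rw [Eq.comm, decide_eq_false_iff_not]
      rintro ⟨hf0, hfl⟩
      rw [hfind] at hf0 hfl
      have : PySem.Chars.isIn q (s.drop ((PySem.Chars.find s [x, y]).toNat + 2)) = true := by
        rw [pvLast_isIn q s l _ hl]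
        push_cast
        omega
      rw [hqin] at this
      exact absurd this (by simp)
  · have hneg : ¬ 0 ≤ PySem.Chars.find s [x, y] := by
      intro hc
      rw [PySem.Chars.find_nonneg_iff, ← PySem.Chars.isIn_iff_infix] at hc
      exact hin (by simpa using hc)
    simp only [pvInnerA, hin, if_false, Bool.false_eq_true]
    rw [Eq.comm, decide_eq_false_iff_not]
    rintro ⟨hf0, _⟩
    rw [hfind] at hf0
    exact hneg hf0

-- ===== VERDICT (by name: the statement is the Claim_ definition above) =====
theorem post_prrocess_3_normal_spec : Claim_equal_post_prrocess_3_normal := by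
  intro input _
  unfold Spec_post_prrocess_3_normal post_prrocess_3_normal post_prrocess_3_normal_alt
  rw [pv_all_eq]
  set s := (input.map (fun tok => PySem.List.slice tok.toList none (some (-1)) ++ [' '])).flatten with hs
  obtain ⟨_, hfan, hfia, hlia, hle, hlu, hli⟩ := pvScan_spec s
  simp only [List.zip, List.zipWith, pvOuterA, pvPick,
    pv_inner_eq _ _ _ _ _ _ hfan hlia,
    pv_inner_eq _ _ _ _ _ _ hfia hlia,
    pv_inner_eq _ _ _ _ _ _ hfan hle,
    pv_inner_eq _ _ _ _ _ _ hfan hlu,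
    pv_inner_eq _ _ _ _ _ _ hfan hli,
    pv_inner_eq _ _ _ _ _ _ hfia hle,
    pv_inner_eq _ _ _ _ _ _ hfia hlu,
    pv_inner_eq _ _ _ _ _ _ hfia hli,
    decide_eq_true_eq]
  split_ifs <;> rfl
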